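-- pv_equiv track=rewrite | github.com/SJeliazkova/SoftUni | Python-Advanced/02-Tuples-and-Sets-Lab_/05-sottuni-party.py | separate_into_vip_and_regular
-- ===== SOURCE A (Python) =====
-- def is_vip_guest(guest):
--     return guest[0].isdigit()
--
-- def separate_into_vip_and_regular(guests):
--     vip_guests = []
--     regular_guest = []
--     for g in guests:
--         if is_vip_guest(g):
--             vip_guests.append(g)
--         else:
--             regular_guest.append(g)
--
--     return (sorted(vip_guests), sorted(regular_guest))
-- ===== SOURCE B (Python) =====
-- def _merge(xs, ys):
--     out = []
--     i = j = 0
--     while i < len(xs) and j < len(ys):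
--         if xs[i] <= ys[j]:
--             out.append(xs[i])
--             i += 1
--         else:
--             out.append(ys[j])
--             j += 1
--     out.extend(xs[i:])
--     out.extend(ys[j:])
--     return out
--
-- def separate_into_vip_and_regular(guests):
--     if len(guests) <= 1:
--         if not guests:
--             return ([], [])
--         g = guests[0]
--         return (([g], []) if g[0].isdigit() else ([], [g]))
--     mid = len(guests) // 2
--     left_vip, left_reg = separate_into_vip_and_regular(guests[:mid])
--     right_vip, right_reg = separate_into_vip_and_regular(guests[mid:])
--     return (_merge(left_vip, right_vip), _merge(left_reg, right_reg))
-- ===== Notes on version B (the rewrite author's own statement) =====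
-- stated objective: alternative
-- what changed: B is a divide-and-conquer: it never partitions the list and never calls sorted(), instead splitting the guest list in half, recursing to get each half's (vip, regular) pair, and merging the two vip halves and the two regular halves with a hand-written two-pointer merge (a mergesort that carries both buckets up the recursion).
import Mathlib
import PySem

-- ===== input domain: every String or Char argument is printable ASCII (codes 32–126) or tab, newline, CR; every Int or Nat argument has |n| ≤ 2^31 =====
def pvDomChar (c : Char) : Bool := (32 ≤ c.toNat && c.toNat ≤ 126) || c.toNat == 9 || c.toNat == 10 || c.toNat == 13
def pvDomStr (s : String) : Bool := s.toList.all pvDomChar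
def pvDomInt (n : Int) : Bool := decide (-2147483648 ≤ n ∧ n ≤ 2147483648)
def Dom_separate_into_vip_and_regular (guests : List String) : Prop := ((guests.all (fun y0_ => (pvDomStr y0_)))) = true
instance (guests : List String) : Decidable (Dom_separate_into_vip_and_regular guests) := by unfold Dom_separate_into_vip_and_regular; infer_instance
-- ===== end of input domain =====

-- B is a divide-and-conquer (hand-written mergesort) that computes the VIP/regular
-- pair directly: split in half, recurse, merge the two VIP halves and the two
-- regular halves; no partition pass and no sorted() call. Same results on every
-- list without empty strings.

-- ===== PORT A =====
-- guest[0].isdigit(); guest[0] raises IndexError on "" (excluded by Pre_), the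
-- 'none' branch below is never reached on admitted inputs.
def is_vip_guest (guest : String) : Bool :=
  match PySem.Str.pyGet? guest 0 with
  | some c => PySem.Chars.isdigit c
  | none => false

def separate_into_vip_and_regular (guests : List String) : List String × List String :=
  let acc := guests.foldl
    (fun (p : List String × List String) g =>
      if is_vip_guest g then (p.1 ++ [g], p.2) else (p.1, p.2 ++ [g]))
    ([], [])
  (PySem.List.sorted acc.1 (fun x => x) false, PySem.List.sorted acc.2 (fun x => x) false)

-- ===== PORT B =====
-- _merge of Source B: the two-pointer while loop becomes the obvious recursion on the
-- two unconsumed suffixes (the trailing extends are the one-sided cases)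
def mergeStr : List String → List String → List String
  | [], ys => ys
  | x :: xs, [] => x :: xs
  | x :: xs, y :: ys =>
    if x ≤ y then x :: mergeStr xs (y :: ys) else y :: mergeStr (x :: xs) ys
termination_by xs ys => xs.length + ys.length

-- Source B's recursion; guests[:mid] / guests[mid:] are List.take / List.drop (0 ≤ mid ≤ len);
-- the inline g[0].isdigit() test is the same check as A's helper, reused verbatim
def separate_into_vip_and_regular_alt (guests : List String) : List String × List String :=
  if _h : guests.length ≤ 1 then
    match guests with
    | [] => ([], [])
    | g :: _ => if is_vip_guest g then ([g], []) else ([], [g])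
  else
    let mid := guests.length / 2
    let l := separate_into_vip_and_regular_alt (guests.take mid)
    let r := separate_into_vip_and_regular_alt (guests.drop mid)
    (mergeStr l.1 r.1, mergeStr l.2 r.2)
termination_by guests.length
decreasing_by
  · simp only [List.length_take]; omega
  · simp only [List.length_drop]; omega

-- ===== PRECONDITION & SPEC =====
-- Pre_ excludes lists containing the empty string, on which both Pythons raise IndexError.
def Pre_separate_into_vip_and_regular (guests : List String) : Prop := "" ∉ guests
instance (guests : List String) : Decidable (Pre_separate_into_vip_and_regular guests) := by unfold Pre_separate_into_vip_and_regular; infer_instance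

def pvWitness_separate_into_vip_and_regular : List String := ["5Peter", "Anna", "7George", "zoe"]

def Spec_separate_into_vip_and_regular (guests : List String) (out : List String × List String) : Prop := out = separate_into_vip_and_regular_alt guests
instance (guests : List String) (out : List String × List String) : Decidable (Spec_separate_into_vip_and_regular guests out) := by unfold Spec_separate_into_vip_and_regular; infer_instance

-- ===== CLAIM (what is proved, stated in full; the proofs are below) =====
def Claim_equal_separate_into_vip_and_regular : Prop := ∀ (guests : List String), Dom_separate_into_vip_and_regular guests → Pre_separate_into_vip_and_regular guests → Spec_separate_into_vip_and_regular guests (separate_into_vip_and_regular guests)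

-- ===== LEMMAS AND PROOFS =====

-- A's partition fold returns (filter p, filter ¬p) appended to the accumulator.
theorem foldl_partition_eq_filter (l : List String) (acc : List String × List String) :
    l.foldl
      (fun (p : List String × List String) g =>
        if is_vip_guest g then (p.1 ++ [g], p.2) else (p.1, p.2 ++ [g])) acc
    = (acc.1 ++ l.filter is_vip_guest, acc.2 ++ l.filter (fun g => ! is_vip_guest g)) := by
  induction l generalizing acc with
  | nil => simp
  | cons h t ih =>
    by_cases hv : is_vip_guest h <;> simp [hv, ih]

theorem mergeStr_perm (xs ys : List String) : (mergeStr xs ys).Perm (xs ++ ys) := by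
  fun_induction mergeStr xs ys with
  | case1 ys => simp
  | case2 x xs => simp
  | case3 x xs y ys hle ih => exact ih.cons x
  | case4 x xs y ys hle ih =>
    exact (ih.cons y).trans List.perm_middle.symm

theorem mergeStr_pairwise (xs ys : List String)
    (hxs : xs.Pairwise (· ≤ ·)) (hys : ys.Pairwise (· ≤ ·)) :
    (mergeStr xs ys).Pairwise (· ≤ ·) := by
  fun_induction mergeStr xs ys with
  | case1 ys => exact hys
  | case2 x xs => exact hxs
  | case3 x xs y ys hle ih =>
    rcases List.pairwise_cons.mp hxs with ⟨hx, hxs'⟩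
    refine List.pairwise_cons.mpr ⟨?_, ih hxs' hys⟩
    intro z hz
    rcases List.mem_append.mp ((mergeStr_perm xs (y :: ys)).mem_iff.mp hz) with hz | hz
    · exact hx z hz
    · rcases List.mem_cons.mp hz with rfl | hz
      · exact hle
      · exact le_trans hle ((List.pairwise_cons.mp hys).1 z hz)
  | case4 x xs y ys hle ih =>
    rcases List.pairwise_cons.mp hys with ⟨hy, hys'⟩
    have hyx : y ≤ x := le_of_not_ge hle
    refine List.pairwise_cons.mpr ⟨?_, ih hxs hys'⟩
    intro z hz
    rcases List.mem_append.mp ((mergeStr_perm (x :: xs) ys).mem_iff.mp hz) with hz | hz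
    · rcases List.mem_cons.mp hz with rfl | hz
      · exact hyx
      · exact le_trans hyx ((List.pairwise_cons.mp hxs).1 z hz)
    · exact hy z hz

-- merging two sorted lists sorts the concatenation
theorem mergeStr_sorted (a b : List String) :
    mergeStr (PySem.List.sorted a (fun x => x) false) (PySem.List.sorted b (fun x => x) false)
      = PySem.List.sorted (a ++ b) (fun x => x) false := by
  refine (PySem.List.sorted_id_eq_of_perm_of_pairwise _ _ ?_ ?_).symm
  · exact (mergeStr_perm _ _).trans
      ((PySem.List.sorted_perm a (fun x => x) false).append
        (PySem.List.sorted_perm b (fun x => x) false))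
  · exact mergeStr_pairwise _ _ (PySem.List.sorted_pairwise a (fun x => x))
      (PySem.List.sorted_pairwise b (fun x => x))

theorem sorted_nil :
    PySem.List.sorted ([] : List String) (fun x => x) false = [] :=
  PySem.List.sorted_eq_self_of_pairwise _ _ (by simp)

theorem sorted_singleton (g : String) :
    PySem.List.sorted [g] (fun x => x) false = [g] :=
  PySem.List.sorted_eq_self_of_pairwise _ _ (by simp)

-- B computes the sorted filtered buckets.
theorem alt_eq_sorted_filter (n : Nat) : ∀ (l : List String), l.length = n →
    separate_into_vip_and_regular_alt l
      = (PySem.List.sorted (l.filter is_vip_guest) (fun x => x) false,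
         PySem.List.sorted (l.filter (fun g => ! is_vip_guest g)) (fun x => x) false) := by
  induction n using Nat.strong_induction_on with
  | _ n ih =>
    intro l hl
    rw [separate_into_vip_and_regular_alt]
    by_cases h1 : l.length ≤ 1
    · simp only [h1, dite_true]
      match l with
      | [] => simp [sorted_nil]
      | [g] =>
        by_cases hv : is_vip_guest g <;>
          simp [hv, sorted_singleton, sorted_nil]
      | g1 :: g2 :: t => simp at h1
    · simp only [h1, dite_false]
      have hn2 : 2 ≤ l.length := by omega
      have htake : (l.take (l.length / 2)).length = l.length / 2 := by
        simp only [List.length_take]; omega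
      have hdrop : (l.drop (l.length / 2)).length = l.length - l.length / 2 := by
        simp only [List.length_drop]
      rw [ih (l.length / 2) (by omega) _ htake,
          ih (l.length - l.length / 2) (by omega) _ hdrop]
      simp only [mergeStr_sorted, ← List.filter_append, List.take_append_drop]
  -- the two recursive calls are on strictly shorter halves, handled by strong induction

-- ===== VERDICT (by name: the statement is the Claim_ definition above) =====
theorem separate_into_vip_and_regular_spec : Claim_equal_separate_into_vip_and_regular := by
  intro guests _ _
  unfold Spec_separate_into_vip_and_regular separate_into_vip_and_regular
  rw [foldl_partition_eq_filter, alt_eq_sorted_filter guests.length guests rfl]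
  simp
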